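-- pv_equiv track=rewrite | github.com/Hedy-dev/DataCompression | capitalization.py | exeptions_dist
-- ===== SOURCE A (Python) =====
-- def exeptions_dist(exception_markers):
--     distances = []
--     last_one_index = -1
--     for i, marker in enumerate(exception_markers):
--         if marker == 1:
--             if last_one_index == -1: # Первая единица
--                 distances.append(i)
--             else:
--                 distances.append(i - last_one_index)
--             last_one_index = i
--     return distances
-- ===== SOURCE B (Python) =====
-- def exeptions_dist(exception_markers):
--     idx = [i for i, m in enumerate(exception_markers) if m == 1]
--     return [b - a for a, b in zip([0] + idx, idx)]
-- ===== Notes on version B (the rewrite author's own statement) =====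
-- stated objective: simpler
-- what changed: Replaces the single streaming pass with mutable last_one_index state by a two-phase decomposition: build the list of 1-marker positions, then take differences of consecutive positions with 0 prepended.
import Mathlib
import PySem

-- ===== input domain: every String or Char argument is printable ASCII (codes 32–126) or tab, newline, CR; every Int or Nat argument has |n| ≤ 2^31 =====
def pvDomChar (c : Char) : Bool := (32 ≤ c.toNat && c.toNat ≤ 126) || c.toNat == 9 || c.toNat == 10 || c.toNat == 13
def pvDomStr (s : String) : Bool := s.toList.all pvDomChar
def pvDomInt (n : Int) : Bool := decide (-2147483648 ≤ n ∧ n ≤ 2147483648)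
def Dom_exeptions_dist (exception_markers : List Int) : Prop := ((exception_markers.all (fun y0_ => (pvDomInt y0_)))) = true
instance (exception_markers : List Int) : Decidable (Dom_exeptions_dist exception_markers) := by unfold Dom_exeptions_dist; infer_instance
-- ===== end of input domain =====

-- B replaces A's streaming pass with a build-positions-then-diff decomposition; same O(n) cost, return value proved identical.

-- ===== PORT A =====
-- step of A's for-loop: state = (distances, last_one_index)
def exeptionsDistStep (s : List Int × Int) (p : Int × Int) : List Int × Int :=
  if p.2 == 1 then
    (s.1 ++ [if s.2 == -1 then p.1 else p.1 - s.2], p.1)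
  else s

def exeptions_dist (exception_markers : List Int) : List Int :=
  ((PySem.List.enumerate exception_markers).foldl exeptionsDistStep ([], -1)).1

-- ===== PORT B =====
def exeptions_dist_alt (exception_markers : List Int) : List Int :=
  let idx : List Int :=
    (PySem.List.enumerate exception_markers).filterMap
      (fun p => if p.2 == 1 then some p.1 else none)
  (List.zip (0 :: idx) idx).map (fun q => q.2 - q.1)

-- ===== PRECONDITION & SPEC =====
def Spec_exeptions_dist (exception_markers : List Int) (out : List Int) : Prop := out = exeptions_dist_alt exception_markers
instance (exception_markers : List Int) (out : List Int) : Decidable (Spec_exeptions_dist exception_markers out) := by unfold Spec_exeptions_dist; infer_instance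

-- ===== CLAIM (what is proved, stated in full; the proofs are below) =====
def Claim_equal_exeptions_dist : Prop := ∀ (exception_markers : List Int), Dom_exeptions_dist exception_markers → Spec_exeptions_dist exception_markers (exeptions_dist exception_markers)

-- ===== LEMMAS AND PROOFS =====

-- consecutive differences with previous value `prev` (what B's zip/map computes)
def pvDiffs (prev : Int) : List Int → List Int
  | [] => []
  | x :: t => (x - prev) :: pvDiffs x t

theorem zip_map_eq_pvDiffs (prev : Int) (l : List Int) :
    (List.zip (prev :: l) l).map (fun q => q.2 - q.1) = pvDiffs prev l := by
  induction l generalizing prev with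
  | nil => rfl
  | cons x t ih =>
    simpa [pvDiffs, List.zip] using ih x

def pvEff (last : Int) : Int := if last == -1 then 0 else last

-- loop invariant for A's fold, over an arbitrary list of enumerated pairs
theorem fold_eq_diffs (ps : List (Int × Int)) (acc : List Int) (last : Int)
    (h : ∀ p ∈ ps, (0:Int) ≤ p.1) :
    (ps.foldl exeptionsDistStep (acc, last)).1 =
      acc ++ pvDiffs (pvEff last) (ps.filterMap (fun p => if p.2 == 1 then some p.1 else none)) := by
  induction ps generalizing acc last with
  | nil => simp [pvDiffs]
  | cons p t ih =>
    have hp : (0:Int) ≤ p.1 := h p List.mem_cons_self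
    have ht : ∀ q ∈ t, (0:Int) ≤ q.1 := fun q hq => h q (List.mem_cons_of_mem _ hq)
    by_cases hm : p.2 == 1
    · have hne : (p.1 == (-1:Int)) = false := by
        simp only [beq_eq_false_iff_ne, ne_eq]; omega
      simp [exeptionsDistStep, ih _ _ ht, pvEff, hne,
        beq_iff_eq.mp hm, pvDiffs]
      split_ifs <;> omega
    · simp [exeptionsDistStep, hm, ih _ _ ht, beq_eq_false_iff_ne.mp (Bool.eq_false_iff.mpr hm)]

theorem enumerate_fst_nonneg (xs : List Int) (s : Int) (hs : 0 ≤ s) :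
    ∀ p ∈ PySem.List.enumerate xs s, (0:Int) ≤ p.1 := by
  induction xs generalizing s with
  | nil => simp [PySem.List.enumerate_nil]
  | cons x t ih =>
    intro p hp
    rw [PySem.List.enumerate_cons] at hp
    rcases List.mem_cons.mp hp with h1 | h1
    · rw [h1]; exact hs
    · exact ih (s + 1) (by omega) p h1

-- ===== VERDICT (by name: the statement is the Claim_ definition above) =====
theorem exeptions_dist_spec : Claim_equal_exeptions_dist := by
  intro xs _
  unfold Spec_exeptions_dist exeptions_dist exeptions_dist_alt
  rw [fold_eq_diffs _ _ _ (enumerate_fst_nonneg xs 0 le_rfl)]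
  rw [zip_map_eq_pvDiffs]
  rfl
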